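-- pv_equiv track=rewrite | github.com/seoyun0311/Algorithm_study | codeplus_브루트포스/사탕게임2.py | check
-- ===== SOURCE A (Python) =====
-- def check(board, N):
--   max_cnt = 1
--   # 행 검사
--   for i in range(N):
--     cnt = 1
--     for j in range(1, N):
--       if board[i][j] == board[i][j-1]:
--         cnt += 1
--       else:
--         cnt = 1
--       max_cnt = max(cnt, max_cnt)
--
--   # 열 검사
--   for j in range(N):
--     cnt = 1
--     for i in range(1,N):
--       if board[i][j] == board[i-1][j]:
--         cnt += 1
--       else:
--         cnt = 1
--       max_cnt = max(cnt, max_cnt)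
--   return max_cnt
-- ===== SOURCE B (Python) =====
-- def _runs(line):
--     """Lengths of the maximal runs of equal adjacent values, in order."""
--     if not line:
--         return []
--     sizes, cnt = [], 1
--     for prev, x in zip(line, line[1:]):
--         if x == prev:
--             cnt += 1
--         else:
--             sizes.append(cnt)
--             cnt = 1
--     return sizes + [cnt]
--
--
-- def check(board, N):
--     rows = [board[i][:N] for i in range(N)]
--     lines = rows + [list(col) for col in zip(*rows)]
--     return max([1] + [n for line in lines for n in _runs(line)])
-- ===== Notes on version B (the rewrite author's own statement) =====
-- stated objective: simpler
-- what changed: B replaces the two index-swapped per-cell counter scans (running cnt with an in-loop max update) by one pipeline: slice the NxN rows, transpose them with zip(*rows), run-length-encode every line once, and take a single max over 1 and all run lengths.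
-- outside the precondition, e.g. on check([], 1): A returns 1, B raises IndexError
import Mathlib
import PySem

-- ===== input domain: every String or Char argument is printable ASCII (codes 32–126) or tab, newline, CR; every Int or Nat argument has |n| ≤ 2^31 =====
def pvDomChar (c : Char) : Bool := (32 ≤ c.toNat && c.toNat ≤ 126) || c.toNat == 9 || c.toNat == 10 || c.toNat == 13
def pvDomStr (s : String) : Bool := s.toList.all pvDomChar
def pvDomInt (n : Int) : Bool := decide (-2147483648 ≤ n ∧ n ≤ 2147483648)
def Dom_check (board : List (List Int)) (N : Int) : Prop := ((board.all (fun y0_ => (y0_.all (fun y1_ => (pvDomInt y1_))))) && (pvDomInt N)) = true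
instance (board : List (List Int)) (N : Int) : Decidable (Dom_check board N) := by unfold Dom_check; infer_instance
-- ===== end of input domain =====

-- B replaces A's two index-swapped per-cell counter scans by slice rows / transpose / run-length-encode
-- each line once / one flat max — a simpler decomposition, same O(N^2) cost.

-- ===== PORT A =====
def check (board : List (List Int)) (N : Int) : Int :=
  let m1 := (PySem.List.pyRange 0 N 1).foldl (fun maxc i =>
    ((PySem.List.pyRange 1 N 1).foldl (fun (p : Int × Int) j =>
      let c : Int := if PySem.List.pyGetD (PySem.List.pyGetD board i []) j 0
          = PySem.List.pyGetD (PySem.List.pyGetD board i []) (j - 1) 0 then p.1 + 1 else 1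
      (c, max c p.2)) ((1 : Int), maxc)).2) (1 : Int)
  (PySem.List.pyRange 0 N 1).foldl (fun maxc j =>
    ((PySem.List.pyRange 1 N 1).foldl (fun (p : Int × Int) i =>
      let c : Int := if PySem.List.pyGetD (PySem.List.pyGetD board i []) j 0
          = PySem.List.pyGetD (PySem.List.pyGetD board (i - 1) []) j 0 then p.1 + 1 else 1
      (c, max c p.2)) ((1 : Int), maxc)).2) m1

-- ===== PORT B =====
-- Source B's _runs: lengths of the maximal runs of equal adjacent values, in order
def runLengths (line : List Int) : List Int :=
  if line.isEmpty then []
  else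
    let r := (line.zip line.tail).foldl
      (fun (p : List Int × Int) (q : Int × Int) =>
        if q.2 = q.1 then (p.1, p.2 + 1) else (p.1 ++ [p.2], 1)) ([], (1 : Int))
    r.1 ++ [r.2]

-- heads and tails of the remaining rows; none when some row is exhausted (zip's stop rule)
def headsTails? : List (List Int) → Option (List Int × List (List Int))
  | [] => some ([], [])
  | [] :: _ => none
  | (y :: ys) :: rs =>
    match headsTails? rs with
    | none => none
    | some (hs, ts) => some (y :: hs, ys :: ts)

def zipCols : List Int → List (List Int) → List (List Int)
  | [], _ => []
  | x :: xs, rest =>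
    match headsTails? rest with
    | none => []
    | some (hs, ts) => (x :: hs) :: zipCols xs ts

-- zip(*rows), each tuple as a list
def pyZipStar : List (List Int) → List (List Int)
  | [] => []
  | r :: rs => zipCols r rs

def check_alt (board : List (List Int)) (N : Int) : Int :=
  let rows := (PySem.List.pyRange 0 N 1).map
    (fun i => PySem.List.slice (PySem.List.pyGetD board i []) none (some N))
  let lines := rows ++ pyZipStar rows
  (PySem.List.max? ((1 : Int) :: lines.flatMap runLengths) (fun x => x)).getD 1

-- ===== PRECONDITION & SPEC =====
-- Pre_ excludes exactly the inputs where one of the programs raises IndexError: for N ≥ 2 A itself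
-- raises unless the board holds a full N×N subgrid, and for N = 1 with an empty board A's loops
-- never touch the board (A returns 1) while B's row slicing raises — that corner is excluded.
def Pre_check (board : List (List Int)) (N : Int) : Prop :=
  0 < N → (N ≤ (board.length : Int) ∧
    (1 < N → ∀ r ∈ board.take N.toNat, N ≤ (r.length : Int)))
instance (board : List (List Int)) (N : Int) : Decidable (Pre_check board N) := by
  unfold Pre_check; infer_instance

def pvWitness_check : List (List Int) × Int := ([[1, 1], [2, 1]], 2)

def Spec_check (board : List (List Int)) (N : Int) (out : Int) : Prop := out = check_alt board N
instance (board : List (List Int)) (N : Int) (out : Int) : Decidable (Spec_check board N out) := by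
  unfold Spec_check; infer_instance

-- ===== CLAIM (what is proved, stated in full; the proofs are below) =====
def Claim_equal_check : Prop := ∀ (board : List (List Int)) (N : Int), Dom_check board N → Pre_check board N → Spec_check board N (check board N)

-- ===== LEMMAS AND PROOFS =====

-- run lengths, consuming the list of (previous, current) pairs, with the current run length cnt
def goRuns : Int → List (Int × Int) → List Int
  | cnt, [] => [cnt]
  | cnt, (prev, x) :: ps => if x = prev then goRuns (cnt + 1) ps else cnt :: goRuns 1 ps

lemma goRuns_head (ps : List (Int × Int)) (cnt : Int) :
    ∃ m t, goRuns cnt ps = m :: t ∧ cnt ≤ m := by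
  induction ps generalizing cnt with
  | nil => exact ⟨cnt, [], rfl, le_refl _⟩
  | cons q ps ih =>
    obtain ⟨prev, x⟩ := q
    by_cases h : x = prev
    · obtain ⟨m, t, he, hm⟩ := ih (cnt + 1)
      exact ⟨m, t, by simp [goRuns, h, he], by omega⟩
    · exact ⟨cnt, goRuns 1 ps, by simp [goRuns, h], le_refl _⟩

-- A's per-line counter loop over (previous, current) pairs computes the running max of goRuns
lemma A_fold (ps : List (Int × Int)) (cnt maxc : Int) (h1 : 1 ≤ cnt) (h2 : cnt ≤ maxc) :
    (ps.foldl (fun (p : Int × Int) (q : Int × Int) =>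
        let c : Int := if q.2 = q.1 then p.1 + 1 else 1
        (c, max c p.2)) (cnt, maxc)).2
      = (goRuns cnt ps).foldl max maxc := by
  induction ps generalizing cnt maxc with
  | nil => simp [goRuns]; omega
  | cons q ps ih =>
    obtain ⟨prev, x⟩ := q
    by_cases h : x = prev
    · simp only [List.foldl_cons, goRuns, if_pos h]
      rw [ih (cnt + 1) (max (cnt + 1) maxc) (by omega) (by omega)]
      obtain ⟨m, t, he, hm⟩ := goRuns_head ps (cnt + 1)
      rw [he]
      simp only [List.foldl_cons]
      congr 1
      omega
    · simp only [List.foldl_cons, goRuns, if_neg h]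
      rw [ih 1 (max 1 maxc) (by omega) (by omega)]
      have h3 : max 1 maxc = maxc := by omega
      have h4 : max maxc cnt = maxc := by omega
      rw [h3, h4]

-- Source B's _runs loop builds sizes ++ goRuns
lemma B_fold (ps : List (Int × Int)) (sizes : List Int) (cnt : Int) :
    (ps.foldl (fun (p : List Int × Int) (q : Int × Int) =>
        if q.2 = q.1 then (p.1, p.2 + 1) else (p.1 ++ [p.2], 1)) (sizes, cnt)).1
      ++ [(ps.foldl (fun (p : List Int × Int) (q : Int × Int) =>
        if q.2 = q.1 then (p.1, p.2 + 1) else (p.1 ++ [p.2], 1)) (sizes, cnt)).2]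
      = sizes ++ goRuns cnt ps := by
  induction ps generalizing sizes cnt with
  | nil => simp [goRuns]
  | cons q ps ih =>
    obtain ⟨prev, x⟩ := q
    by_cases h : x = prev
    · simp only [List.foldl_cons, goRuns, if_pos h]
      exact ih sizes (cnt + 1)
    · simp only [List.foldl_cons, goRuns, if_neg h]
      rw [ih (sizes ++ [cnt]) 1]
      simp

lemma runLengths_cons (x : Int) (xs : List Int) :
    runLengths (x :: xs) = goRuns 1 ((x :: xs).zip xs) := by
  have := B_fold ((x :: xs).zip xs) [] 1
  simp only [List.nil_append] at this
  simp [runLengths, this]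

-- the (previous, current) pairs read by A's index loop are zip line line.tail
lemma pairs_map (line : List Int) :
    (PySem.List.pyRange 1 (line.length : Int) 1).map
      (fun j => (PySem.List.pyGetD line (j - 1) 0, PySem.List.pyGetD line j 0))
    = line.zip line.tail := by
  apply List.ext_getElem
  · simp [PySem.List.length_pyRange_one]
  · intro k h1 h2
    have hk1 : k + 1 < line.length := by
      simp at h2
      omega
    simp only [List.getElem_map, PySem.List.getElem_pyRange_one, List.getElem_zip]
    rw [Prod.mk.injEq]
    constructor
    · have : (1 : Int) + (k : Int) - 1 = ((k : Nat) : Int) := by ring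
      rw [this, PySem.List.pyGetD_natCast]
      simp [List.getD_eq_getElem?_getD, List.getElem?_eq_getElem (by omega : k < line.length)]
    · have : (1 : Int) + (k : Int) = (((k + 1 : Nat)) : Int) := by push_cast; ring
      rw [this, PySem.List.pyGetD_natCast]
      rw [List.getElem_tail]
      simp [List.getD_eq_getElem?_getD, List.getElem?_eq_getElem hk1]

-- A's per-line scan equals the running max over the line's run lengths
lemma lineScan (line : List Int) (maxc : Int) (h1 : 1 ≤ maxc) :
    ((PySem.List.pyRange 1 (line.length : Int) 1).foldl
      (fun (p : Int × Int) j =>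
        let c : Int := if PySem.List.pyGetD line j 0 = PySem.List.pyGetD line (j - 1) 0
          then p.1 + 1 else 1
        (c, max c p.2)) ((1 : Int), maxc)).2
    = (runLengths line).foldl max maxc := by
  cases line with
  | nil =>
    rw [PySem.List.pyRange_one_eq_nil (by simp)]
    simp [runLengths]
  | cons x xs =>
    rw [show ((PySem.List.pyRange 1 ((x :: xs).length : Int) 1).foldl
        (fun (p : Int × Int) j =>
          let c : Int := if PySem.List.pyGetD (x :: xs) j 0 = PySem.List.pyGetD (x :: xs) (j - 1) 0
            then p.1 + 1 else 1
          (c, max c p.2)) ((1 : Int), maxc))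
      = (((PySem.List.pyRange 1 ((x :: xs).length : Int) 1).map
          (fun j => (PySem.List.pyGetD (x :: xs) (j - 1) 0, PySem.List.pyGetD (x :: xs) j 0))).foldl
        (fun (p : Int × Int) (q : Int × Int) =>
          let c : Int := if q.2 = q.1 then p.1 + 1 else 1
          (c, max c p.2)) ((1 : Int), maxc)) from by rw [List.foldl_map]]
    rw [pairs_map]
    rw [runLengths_cons]
    exact A_fold _ 1 maxc (le_refl _) h1

-- fold congruence under the invariant 1 ≤ acc
lemma foldl_inv_congr {α : Type} (l : List α) (f g : Int → α → Int) (m : Int)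
    (hm : 1 ≤ m) (h : ∀ a ∈ l, ∀ s : Int, 1 ≤ s → f s a = g s a ∧ 1 ≤ g s a) :
    l.foldl f m = l.foldl g m := by
  induction l generalizing m with
  | nil => rfl
  | cons a l ih =>
    simp only [List.foldl_cons]
    obtain ⟨he, hg⟩ := h a (List.mem_cons_self) m hm
    rw [he]
    exact ih _ hg (fun b hb => h b (List.mem_cons_of_mem a hb))

lemma foldl_inv_ge {α : Type} (l : List α) (g : Int → α → Int) (m : Int)
    (hm : 1 ≤ m) (h : ∀ a ∈ l, ∀ s : Int, 1 ≤ s → 1 ≤ g s a) : 1 ≤ l.foldl g m := by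
  induction l generalizing m with
  | nil => exact hm
  | cons a l ih =>
    exact ih _ (h a (List.mem_cons_self) m hm) (fun b hb => h b (List.mem_cons_of_mem a hb))

lemma getD_take {α : Type} (xs : List α) (n k : Nat) (d : α) (hk : k < n) :
    (xs.take n).getD k d = xs.getD k d := by
  simp [List.getD_eq_getElem?_getD, hk]

lemma headsTails?_eq (rs : List (List Int)) (h : ∀ t ∈ rs, t ≠ []) :
    headsTails? rs = some (rs.map (fun t => t.getD 0 0), rs.map List.tail) := by
  induction rs with
  | nil => rfl
  | cons t rs ih =>
    cases t with
    | nil => exact absurd rfl (h [] (List.mem_cons_self))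
    | cons y ys =>
      simp only [headsTails?, ih (fun u hu => h u (List.mem_cons_of_mem _ hu))]
      simp

-- zip(*rows) on same-length rows is the list of columns
lemma zipCols_eq (r : List Int) (rs : List (List Int)) (h : ∀ t ∈ rs, t.length = r.length) :
    zipCols r rs = (List.range r.length).map (fun k => (r :: rs).map (fun t => t.getD k 0)) := by
  induction r generalizing rs with
  | nil => simp [zipCols]
  | cons x xs ih =>
    have hne : ∀ t ∈ rs, t ≠ [] := by
      intro t ht hcon
      have := h t ht
      simp [hcon] at this
    have hzip : zipCols (x :: xs) rs
        = (x :: rs.map (fun t => t.getD 0 0)) :: zipCols xs (rs.map List.tail) := by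
      rw [zipCols, headsTails?_eq rs hne]
    rw [hzip]
    rw [ih (rs.map List.tail) (by
      intro t ht
      obtain ⟨u, hu, rfl⟩ := List.mem_map.mp ht
      have := h u hu
      simp at this ⊢
      omega)]
    simp only [List.length_cons, List.range_succ_eq_map, List.map_cons, List.map_map]
    congr 1
    apply List.map_congr_left
    intro k hk
    simp only [Function.comp_apply]
    congr 1
    apply List.map_congr_left
    intro t ht
    obtain ⟨y, ys, rfl⟩ : ∃ y ys, t = y :: ys := by
      cases t with
      | nil => exact absurd rfl (hne [] ht)
      | cons y ys => exact ⟨y, ys, rfl⟩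
    simp [Nat.succ_eq_add_one]


-- A's per-row index scan, with the row's first N cells as the line
lemma rowScan (row : List Int) (n : Nat) (s : Int) (h1 : 1 ≤ s) (hlen : n ≤ row.length) :
    ((PySem.List.pyRange 1 (n : Int) 1).foldl
      (fun (p : Int × Int) j =>
        let c : Int := if PySem.List.pyGetD row j 0 = PySem.List.pyGetD row (j - 1) 0
          then p.1 + 1 else 1
        (c, max c p.2)) ((1 : Int), s)).2
    = (runLengths (row.take n)).foldl max s := by
  have hll : (row.take n).length = n := by simp [hlen]
  have hcg : ∀ (j : Int), 1 ≤ j → j < (n : Int) →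
      (PySem.List.pyGetD row j 0 = PySem.List.pyGetD (row.take n) j 0) ∧
      (PySem.List.pyGetD row (j - 1) 0 = PySem.List.pyGetD (row.take n) (j - 1) 0) := by
    intro j hj1 hj2
    constructor
    · rw [PySem.List.pyGetD_eq_getElem row 0 (by omega) (by exact_mod_cast by omega : j < (row.length : Int)),
        PySem.List.pyGetD_eq_getElem (row.take n) 0 (by omega) (by rw [hll]; exact hj2),
        List.getElem_take]
    · rw [PySem.List.pyGetD_eq_getElem row 0 (by omega) (by exact_mod_cast by omega : j - 1 < (row.length : Int)),
        PySem.List.pyGetD_eq_getElem (row.take n) 0 (by omega) (by rw [hll]; omega),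
        List.getElem_take]
  rw [PySem.List.foldl_congr_mem _ _
    (fun (p : Int × Int) j =>
        let c : Int := if PySem.List.pyGetD (row.take n) j 0 = PySem.List.pyGetD (row.take n) (j - 1) 0
          then p.1 + 1 else 1
        (c, max c p.2)) _
    (by
      intro acc j hj
      obtain ⟨hj1, hj2⟩ := PySem.List.mem_pyRange_one.mp hj
      obtain ⟨e1, e2⟩ := hcg j hj1 hj2
      simp only [e1, e2])]
  rw [show (n : Int) = ((row.take n).length : Int) from by rw [hll]]
  exact lineScan (row.take n) s h1

def rowsOf (board : List (List Int)) (N : Int) : List (List Int) :=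
  (PySem.List.pyRange 0 N 1).map
    (fun i => PySem.List.slice (PySem.List.pyGetD board i []) none (some N))

lemma check_alt_eq (board : List (List Int)) (N : Int) :
    check_alt board N = (rowsOf board N ++ pyZipStar (rowsOf board N)).foldl
      (fun m line => (runLengths line).foldl max m) 1 := by
  show ((PySem.List.max? ((1 : Int) :: (rowsOf board N ++ pyZipStar (rowsOf board N)).flatMap runLengths)
      (fun x => x)).getD 1) = _
  rw [PySem.List.max?_id_cons, Option.getD_some]
  exact List.foldl_flatMap

lemma check_unfold (board : List (List Int)) (N : Int) :
    check board N = (PySem.List.pyRange 0 N 1).foldl (fun maxc j =>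
      ((PySem.List.pyRange 1 N 1).foldl (fun (p : Int × Int) i =>
        let c : Int := if PySem.List.pyGetD (PySem.List.pyGetD board i []) j 0
            = PySem.List.pyGetD (PySem.List.pyGetD board (i - 1) []) j 0 then p.1 + 1 else 1
        (c, max c p.2)) ((1 : Int), maxc)).2)
      ((PySem.List.pyRange 0 N 1).foldl (fun maxc i =>
        ((PySem.List.pyRange 1 N 1).foldl (fun (p : Int × Int) j =>
          let c : Int := if PySem.List.pyGetD (PySem.List.pyGetD board i []) j 0
              = PySem.List.pyGetD (PySem.List.pyGetD board i []) (j - 1) 0 then p.1 + 1 else 1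
          (c, max c p.2)) ((1 : Int), maxc)).2) (1 : Int)) := rfl

lemma main_eq (board : List (List Int)) (N : Int) (hpre : Pre_check board N) :
    check board N = check_alt board N := by
  by_cases hN0 : N ≤ 0
  · -- N <= 0: both loops/ranges are empty, both return 1
    rw [check_unfold, check_alt_eq]
    unfold rowsOf
    rw [PySem.List.pyRange_one_eq_nil hN0]
    simp [pyZipStar]
  have hNpos : 0 < N := by omega
  obtain ⟨hb, hrows'⟩ := hpre hNpos
  set n : Nat := N.toNat with hndef
  have hn : N = (n : Int) := by omega
  have hbn : n ≤ board.length := by omega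
  by_cases hN1' : N = 1
  · -- N = 1: A's inner loops are empty; B sees one row and at most one column, all runs are [1]
    subst hN1'
    obtain ⟨r, rest, rfl⟩ : ∃ r rest, board = r :: rest := by
      cases board with
      | nil => norm_num at hb
      | cons r rest => exact ⟨r, rest, rfl⟩
    have h01 : PySem.List.pyRange 0 1 1 = [0] := by
      have := PySem.List.pyRange_one_singleton 0
      norm_num at this
      exact this
    have h11 : PySem.List.pyRange 1 1 1 = ([] : List Int) :=
      PySem.List.pyRange_one_eq_nil (le_refl _)
    have hslice : PySem.List.slice r none (some (1 : Int)) = r.take 1 := by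
      have := PySem.List.slice_to_natCast r 1
      exact_mod_cast this
    rw [check_unfold, check_alt_eq]
    unfold rowsOf
    rw [h01, h11]
    cases r with
    | nil => simp [pyZipStar, zipCols, runLengths, hslice, PySem.List.pyGetD]
    | cons y ys =>
      simp only [List.map_cons, List.map_nil, PySem.List.pyGetD_zero_cons, hslice]
      simp [pyZipStar, zipCols, headsTails?, runLengths, List.take]
  · -- 2 <= N: the full grid case
    have hn2 : 2 ≤ n := by omega
    have hrows : ∀ r ∈ board.take n, n ≤ r.length := by
      intro r hr
      have := hrows' (by omega) r (by rwa [hndef])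
      omega
    set board' : List (List Int) := board.take n with hbdef
    have hblen : board'.length = n := by simp [hbdef, hbn]
    have hgetb : ∀ (i : Int), 0 ≤ i → i < (n : Int) →
        PySem.List.pyGetD board i [] = PySem.List.pyGetD board' i [] := by
      intro i h0 h1
      rw [PySem.List.pyGetD_eq_getElem board [] h0 (by exact_mod_cast by omega : i < (board.length : Int)),
        PySem.List.pyGetD_eq_getElem board' [] h0 (by rw [hblen]; exact h1)]
      simp [hbdef, List.getElem_take]
    have hmem : ∀ (i : Int), 0 ≤ i → i < (n : Int) → PySem.List.pyGetD board' i [] ∈ board' := by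
      intro i h0 h1
      rw [PySem.List.pyGetD_eq_getElem board' [] h0 (by rw [hblen]; exact h1)]
      exact List.getElem_mem _
    -- the A-side row pass
    have hrowpass :
        (PySem.List.pyRange 0 N 1).foldl (fun maxc i =>
          ((PySem.List.pyRange 1 N 1).foldl (fun (p : Int × Int) j =>
            let c : Int := if PySem.List.pyGetD (PySem.List.pyGetD board i []) j 0
                = PySem.List.pyGetD (PySem.List.pyGetD board i []) (j - 1) 0 then p.1 + 1 else 1
            (c, max c p.2)) ((1 : Int), maxc)).2) (1 : Int)
        = board'.foldl (fun s row => (runLengths (row.take n)).foldl max s) 1 := by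
      rw [foldl_inv_congr _ _
        (fun s i => (runLengths ((PySem.List.pyGetD board' i []).take n)).foldl max s) 1 (le_refl _)
        (by
          intro i hi s hs
          obtain ⟨hi0, hi1⟩ := PySem.List.mem_pyRange_one.mp hi
          rw [hn] at hi1
          constructor
          · rw [hn, rowScan (PySem.List.pyGetD board i []) n s hs
                (hrows _ (by rw [hgetb i hi0 hi1]; exact hmem i hi0 hi1)),
              hgetb i hi0 hi1]
          · exact le_trans hs (PySem.List.le_foldl_max _ _).1)]
      rw [show N = PySem.List.len board' from by simp [PySem.List.len, hblen, hn]]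
      exact PySem.List.foldl_pyRange_zero_pyGetD board' []
        (fun s row => (runLengths (row.take n)).foldl max s) 1
    have hRB : rowsOf board N = board'.map (fun row => row.take n) := by
      unfold rowsOf
      apply List.ext_getElem
      · simp [PySem.List.length_pyRange_one, hblen, hn]
      · intro k hk1 hk2
        have hkn : k < n := by
          simp only [List.length_map, PySem.List.length_pyRange_one, hn] at hk1
          omega
        simp only [List.getElem_map, PySem.List.getElem_pyRange_one]
        rw [show (0 : Int) + (k : Int) = ((k : Nat) : Int) by ring]
        rw [PySem.List.pyGetD_natCast]
        rw [hn, PySem.List.slice_to_natCast]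
        rw [List.getD_eq_getElem?_getD, List.getElem?_eq_getElem (show k < board.length by omega)]
        simp [hbdef, List.getElem_take]
    obtain ⟨b0, bs, hb'⟩ : ∃ b0 bs, board' = b0 :: bs := by
      cases hbb : board' with
      | nil => rw [hbb] at hblen; simp at hblen; omega
      | cons b0 bs => exact ⟨b0, bs, rfl⟩
    have hb0mem : b0 ∈ board' := by rw [hb']; exact List.mem_cons_self
    have hb0len : (b0.take n).length = n := by simp [hrows b0 hb0mem]
    have hlens : ∀ t ∈ bs.map (fun row => row.take n), t.length = (b0.take n).length := by
      intro t ht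
      obtain ⟨u, hu, rfl⟩ := List.mem_map.mp ht
      have h1 : n ≤ u.length := hrows u (by rw [hb']; exact List.mem_cons_of_mem _ hu)
      rw [hb0len]
      simp [h1]
    have hzipB : pyZipStar (rowsOf board N)
        = (List.range n).map (fun k => (rowsOf board N).map (fun t => t.getD k 0)) := by
      rw [hRB, hb', List.map_cons]
      show zipCols (b0.take n) (bs.map (fun row => row.take n)) = _
      rw [zipCols_eq _ _ hlens, hb0len]
    have hcols : ∀ k ∈ List.range n, (rowsOf board N).map (fun t => t.getD k 0)
        = board'.map (fun row => PySem.List.pyGetD row (k : Int) 0) := by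
      intro k hk
      have hkn : k < n := List.mem_range.mp hk
      rw [hRB, List.map_map]
      apply List.map_congr_left
      intro row hrow
      simp only [Function.comp_apply]
      rw [getD_take row n k 0 hkn, PySem.List.pyGetD_natCast]
    have hcolA : ∀ (j : Int), 0 ≤ j → j < (n : Int) → ∀ (s : Int), 1 ≤ s →
        ((PySem.List.pyRange 1 N 1).foldl (fun (p : Int × Int) i =>
          let c : Int := if PySem.List.pyGetD (PySem.List.pyGetD board i []) j 0
              = PySem.List.pyGetD (PySem.List.pyGetD board (i - 1) []) j 0 then p.1 + 1 else 1
          (c, max c p.2)) ((1 : Int), s)).2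
        = (runLengths (board'.map (fun row => PySem.List.pyGetD row j 0))).foldl max s := by
      intro j hj0 hjn s hs
      set col : List Int := board'.map (fun row => PySem.List.pyGetD row j 0) with hcol
      have hclen : col.length = n := by simp [hcol, hblen]
      have hget : ∀ (i : Int), 0 ≤ i → i < (n : Int) →
          PySem.List.pyGetD (PySem.List.pyGetD board i []) j 0 = PySem.List.pyGetD col i 0 := by
        intro i h0 h1
        rw [hgetb i h0 h1]
        rw [PySem.List.pyGetD_eq_getElem col 0 h0 (by rw [hclen]; exact h1)]
        rw [PySem.List.pyGetD_eq_getElem board' [] h0 (by rw [hblen]; exact h1)]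
        simp [hcol]
      rw [PySem.List.foldl_congr_mem _ _
        (fun (p : Int × Int) i =>
          let c : Int := if PySem.List.pyGetD col i 0 = PySem.List.pyGetD col (i - 1) 0
            then p.1 + 1 else 1
          (c, max c p.2)) _
        (by
          intro acc i hi
          obtain ⟨hi1, hi2⟩ := PySem.List.mem_pyRange_one.mp hi
          rw [hn] at hi2
          simp only [hget i (by omega) hi2, hget (i - 1) (by omega) (by omega)])]
      rw [show N = (col.length : Int) from by rw [hclen, hn]]
      exact lineScan col s hs
    rw [check_unfold, hrowpass, check_alt_eq, List.foldl_append]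
    have hinit : (rowsOf board N).foldl (fun m line => (runLengths line).foldl max m) 1
        = board'.foldl (fun s row => (runLengths (row.take n)).foldl max s) 1 := by
      rw [hRB, List.foldl_map]
    rw [hinit, hzipB]
    set M : Int := board'.foldl (fun s row => (runLengths (row.take n)).foldl max s) 1 with hM
    have hMpos : 1 ≤ M := foldl_inv_ge _ _ 1 (le_refl _)
      (fun a _ s hs => le_trans hs (PySem.List.le_foldl_max _ _).1)
    rw [foldl_inv_congr (PySem.List.pyRange 0 N 1) _
      (fun s j => (runLengths (board'.map (fun row => PySem.List.pyGetD row j 0))).foldl max s) M hMpos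
      (by
        intro j hj s hs
        obtain ⟨hj0, hj1⟩ := PySem.List.mem_pyRange_one.mp hj
        rw [hn] at hj1
        exact ⟨hcolA j hj0 hj1 s hs, le_trans hs (PySem.List.le_foldl_max _ _).1⟩)]
    rw [hn, PySem.List.pyRange_zero_nat, List.foldl_map, List.foldl_map]
    apply PySem.List.foldl_congr_mem
    intro acc k hk
    rw [← hn, hcols k hk]


-- ===== VERDICT (by name: the statement is the Claim_ definition above) =====
theorem check_spec : Claim_equal_check := by
  intro board N _hdom hpre
  unfold Spec_check
  exact main_eq board N hpre
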